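-- pv_equiv track=rewrite | github.com/ama66/CompetitiveProgramming | Stacks/Largest_Rectangle_Area.py | First_Smaller_Left
-- ===== SOURCE A (Python) =====
-- def First_Smaller_Left(a):
--     ## put elements in the stack in ascending(small to large)
--     ind_arr=[-1]*len(a)
--     st=[] # I will store original element index in stack not the actual element itself
--     for i in range(len(a)-1,-1,-1):
--         while len(st)!=0 and a[st[-1]] > a[i]:
--             ind_arr[st.pop()]=i
--         st.append(i)
--     return ind_arr
-- ===== SOURCE B (Python) =====
-- def First_Smaller_Left(a):
--     res = []
--     st = []  # indices with strictly increasing values; top is last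
--     for i in range(len(a)):
--         while st and a[st[-1]] >= a[i]:
--             st.pop()
--         res.append(st[-1] if st else -1)
--         st.append(i)
--     return res
-- ===== Notes on version B (the rewrite author's own statement) =====
-- stated objective: alternative
-- what changed: Replaced the backward resolve-on-pop monotonic stack (answers written into a preallocated array when an element is popped) by the classic forward previous-smaller-element scan that pops with >= and reads each answer off the current stack top, appending results in order.
import Mathlib
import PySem

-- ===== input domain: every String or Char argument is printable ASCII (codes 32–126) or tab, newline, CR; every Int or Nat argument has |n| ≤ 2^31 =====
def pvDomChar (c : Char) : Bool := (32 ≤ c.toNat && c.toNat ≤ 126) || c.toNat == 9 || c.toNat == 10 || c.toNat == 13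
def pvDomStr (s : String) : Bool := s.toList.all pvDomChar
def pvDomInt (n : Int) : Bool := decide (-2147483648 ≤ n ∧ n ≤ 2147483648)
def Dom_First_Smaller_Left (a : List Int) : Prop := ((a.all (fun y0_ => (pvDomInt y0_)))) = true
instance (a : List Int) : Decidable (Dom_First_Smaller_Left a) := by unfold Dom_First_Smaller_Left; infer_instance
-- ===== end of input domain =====

-- B rewrites A's backward resolve-on-pop monotonic stack as the classic forward
-- previous-smaller-element scan (pop with >=, read the answer off the stack top); alternative, same cost.

-- ===== PORT A =====
-- Stacks hold list indices, always in range, so `a.getD j 0` is exactly Python's `a[j]`.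
-- The stack top (Python `st[-1]`, appended at the end) is the HEAD of the Lean list.
-- inner `while` loop of A: pop while a[st[-1]] > a[i], writing ind_arr[popped] = i
def popA (a : List Int) (i : Nat) : List Int → List Nat → List Int × List Nat
  | ind, [] => (ind, [])
  | ind, j :: st =>
      if a.getD i 0 < a.getD j 0 then popA a i (ind.set j (i : Int)) st
      else (ind, j :: st)

-- body of A's `for i in range(len(a)-1,-1,-1)` loop
def stepA (a : List Int) (s : List Int × List Nat) (i : Nat) : List Int × List Nat :=
  let r := popA a i s.1 s.2
  (r.1, i :: r.2)

def First_Smaller_Left (a : List Int) : List Int :=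
  ((List.range a.length).reverse.foldl (stepA a) (List.replicate a.length (-1), [])).1

-- ===== PORT B =====
-- inner `while` loop of B: pop while a[st[-1]] >= a[i]
def popB (a : List Int) (x : Int) : List Nat → List Nat
  | [] => []
  | j :: st => if x ≤ a.getD j 0 then popB a x st else j :: st

-- `st[-1] if st else -1`
def headIdx : List Nat → Int
  | [] => -1
  | j :: _ => (j : Int)

-- body of B's `for i in range(len(a))` loop
def stepB (a : List Int) (s : List Int × List Nat) (i : Nat) : List Int × List Nat :=
  let st := popB a (a.getD i 0) s.2
  (s.1 ++ [headIdx st], i :: st)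

def First_Smaller_Left_alt (a : List Int) : List Int :=
  ((List.range a.length).foldl (stepB a) ([], [])).1

-- ===== PRECONDITION & SPEC =====
def Spec_First_Smaller_Left (a : List Int) (out : List Int) : Prop := out = First_Smaller_Left_alt a
instance (a : List Int) (out : List Int) : Decidable (Spec_First_Smaller_Left a out) := by unfold Spec_First_Smaller_Left; infer_instance

-- ===== CLAIM (what is proved, stated in full; the proofs are below) =====
def Claim_equal_First_Smaller_Left : Prop := ∀ (a : List Int), Dom_First_Smaller_Left a → Spec_First_Smaller_Left a (First_Smaller_Left a)

-- ===== LEMMAS AND PROOFS =====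

-- greatest m in [lo, t) with a[m] < x, scanning downward; none if there is none
def scanL (a : List Int) (x : Int) (lo : Nat) : Nat → Option Nat
  | 0 => none
  | t + 1 => if lo ≤ t ∧ a.getD t 0 < x then some t else scanL a x lo t

-- the common specification: previous strictly smaller index, else -1
def outSpec (a : List Int) (lo j : Nat) : Int :=
  match scanL a (a.getD j 0) lo j with
  | some m => (m : Int)
  | none => -1

lemma scanL_eq_none_iff (a : List Int) (x : Int) (lo : Nat) :
    ∀ t, scanL a x lo t = none ↔ ∀ m, lo ≤ m → m < t → ¬ a.getD m 0 < x := by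
  intro t
  induction t with
  | zero => simp [scanL]
  | succ t ih =>
      by_cases h : lo ≤ t ∧ a.getD t 0 < x
      · constructor
        · intro hc
          simp only [scanL, if_pos h] at hc
          cases hc
        · intro hall; exact absurd h.2 (hall t h.1 (Nat.lt_succ_self t))
      · simp only [scanL, if_neg h, ih]
        constructor
        · intro hall m h1 h2
          rcases Nat.lt_succ_iff_lt_or_eq.mp h2 with h2' | rfl
          · exact hall m h1 h2'
          · intro hx; exact h ⟨h1, hx⟩
        · intro hall m h1 h2; exact hall m h1 (Nat.lt_succ_of_lt h2)

lemma scanL_eq_some_iff (a : List Int) (x : Int) (lo : Nat) :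
    ∀ t m, scanL a x lo t = some m ↔
      (lo ≤ m ∧ m < t ∧ a.getD m 0 < x ∧ ∀ l, m < l → l < t → ¬ a.getD l 0 < x) := by
  intro t
  induction t with
  | zero => intro m; simp [scanL]
  | succ t ih =>
      intro m
      by_cases h : lo ≤ t ∧ a.getD t 0 < x
      · simp only [scanL, if_pos h]
        constructor
        · rintro hm
          have hmt : t = m := Option.some.inj hm
          subst hmt
          exact ⟨h.1, Nat.lt_succ_self t, h.2, fun l h1 h2 => (by omega : False).elim⟩
        · rintro ⟨h1, h2, h3, h4⟩
          have : m = t := by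
            by_contra hne
            have hmt : m < t := by omega
            exact h4 t hmt (Nat.lt_succ_self t) h.2
          subst this; rfl
      · simp only [scanL, if_neg h, ih]
        constructor
        · rintro ⟨h1, h2, h3, h4⟩
          refine ⟨h1, Nat.lt_succ_of_lt h2, h3, ?_⟩
          intro l hl1 hl2 hx
          rcases Nat.lt_succ_iff_lt_or_eq.mp hl2 with hl2' | rfl
          · exact h4 l hl1 hl2' hx
          · exact h ⟨by omega, hx⟩
        · rintro ⟨h1, h2, h3, h4⟩
          have hmt : m ≠ t := by
            rintro rfl; exact h ⟨h1, h3⟩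
          refine ⟨h1, by omega, h3, fun l hl1 hl2 => h4 l hl1 (Nat.lt_succ_of_lt hl2)⟩

-- a greatest witness below k
lemma greatest_aux (P : Nat → Prop) [DecidablePred P] :
    ∀ k, (∃ m, m < k ∧ P m) → ∃ m, m < k ∧ P m ∧ ∀ l, m < l → l < k → ¬ P l := by
  intro k
  induction k with
  | zero => rintro ⟨m, hm, _⟩; omega
  | succ k ih =>
      rintro ⟨m, hm, hPm⟩
      by_cases hk : P k
      · exact ⟨k, Nat.lt_succ_self k, hk, fun l h1 h2 => by omega⟩
      · have hm' : m < k := by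
          rcases Nat.lt_succ_iff_lt_or_eq.mp hm with h | rfl
          · exact h
          · exact absurd hPm hk
        obtain ⟨m', h1, h2, h3⟩ := ih ⟨m, hm', hPm⟩
        refine ⟨m', Nat.lt_succ_of_lt h1, h2, ?_⟩
        intro l hl1 hl2
        rcases Nat.lt_succ_iff_lt_or_eq.mp hl2 with h | rfl
        · exact h3 l hl1 h
        · exact hk

lemma getD_set_int (l : List Int) (j : Nat) (v : Int) (q : Nat) :
    (l.set j v).getD q 0 = if q = j ∧ j < l.length then v else l.getD q 0 := by
  by_cases h : q = j ∧ j < l.length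
  · obtain ⟨rfl, hlt⟩ := h
    simp [List.getD_eq_getElem?_getD, List.getElem?_set, hlt]
  · rw [if_neg h]
    by_cases hq : q = j
    · subst hq
      have hlen : ¬ q < l.length := fun hc => h ⟨rfl, hc⟩
      simp [List.getD_eq_getElem?_getD, List.getElem?_set, hlen,
        List.getElem?_eq_none (by omega : l.length ≤ q)]
    · simp [List.getD_eq_getElem?_getD, List.getElem?_set, Ne.symm hq]

-- ===== A-side invariant =====

def charA (a : List Int) (i m : Nat) : Prop :=
  i ≤ m ∧ m < a.length ∧ ∀ l, i ≤ l → l < m → a.getD m 0 ≤ a.getD l 0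

def InvA (a : List Int) (i : Nat) (s : List Int × List Nat) : Prop :=
  s.1.length = a.length ∧
  (∀ j, j < a.length → s.1.getD j 0 = outSpec a i j) ∧
  (∀ m, m ∈ s.2 ↔ charA a i m) ∧
  s.2.Pairwise (· < ·)

lemma popA_spec (a : List Int) (i : Nat) :
    ∀ st ind, (∀ m ∈ st, charA a (i + 1) m) → st.Pairwise (· < ·) →
      ind.length = a.length →
      (popA a i ind st).2 = st.filter (fun j => decide (a.getD j 0 ≤ a.getD i 0)) ∧
      (popA a i ind st).1.length = a.length ∧
      ∀ q, (popA a i ind st).1.getD q 0 =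
        if q ∈ st ∧ a.getD i 0 < a.getD q 0 then (i : Int) else ind.getD q 0 := by
  intro st
  induction st with
  | nil =>
      intro ind _ _ hlen
      exact ⟨rfl, hlen, fun q => by simp [popA]⟩
  | cons j rest ih =>
      intro ind hmem hpw hlen
      have hcj := hmem j (List.mem_cons_self ..)
      by_cases h : a.getD i 0 < a.getD j 0
      · -- j is popped, ind[j] := i
        obtain ⟨h1, h2, h3⟩ := ih (ind.set j (i : Int))
          (fun m hm => hmem m (List.mem_cons_of_mem _ hm)) hpw.of_cons (by simp [hlen])
        simp only [popA, if_pos h]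
        refine ⟨?_, h2, ?_⟩
        · rw [h1, List.filter_cons_of_neg (by simp only [decide_eq_true_eq]; omega)]
        · intro q
          rw [h3 q, getD_set_int]
          have hjlen : j < ind.length := by rw [hlen]; exact hcj.2.1
          by_cases hq : q ∈ rest ∧ a.getD i 0 < a.getD q 0
          · rw [if_pos hq, if_pos ⟨List.mem_cons_of_mem _ hq.1, hq.2⟩]
          · rw [if_neg hq]
            by_cases hqj : q = j
            · subst hqj
              rw [if_pos ⟨rfl, hjlen⟩, if_pos ⟨List.mem_cons_self .., h⟩]
            · have hc1 : ¬(q = j ∧ j < ind.length) := fun hc => hqj hc.1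
              have hc2 : ¬(q ∈ j :: rest ∧ a.getD i 0 < a.getD q 0) := by
                rintro ⟨hmem2, hlt⟩
                rcases List.mem_cons.mp hmem2 with rfl | hr
                · exact hqj rfl
                · exact hq ⟨hr, hlt⟩
              rw [if_neg hc1, if_neg hc2]
      · -- the whole stack survives: every deeper value is ≤ a[j] ≤ a[i]
        have hsmall : ∀ q ∈ j :: rest, a.getD q 0 ≤ a.getD i 0 := by
          intro q hq
          rcases List.mem_cons.mp hq with rfl | hr
          · omega
          · have hcq := hmem q (List.mem_cons_of_mem _ hr)
            have hjq : j < q := (List.pairwise_cons.mp hpw).1 q hr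
            have := hcq.2.2 j hcj.1 hjq
            omega
        simp only [popA, if_neg h]
        refine ⟨?_, hlen, ?_⟩
        · rw [List.filter_eq_self.mpr (fun q hq => by simp only [decide_eq_true_eq]; exact hsmall q hq)]
        · intro q
          rw [if_neg]
          rintro ⟨hq, hlt⟩
          exact absurd (hsmall q hq) (by omega)

lemma stepA_inv (a : List Int) (i : Nat) (s : List Int × List Nat)
    (hi : i < a.length) (h : InvA a (i + 1) s) : InvA a i (stepA a s i) := by
  obtain ⟨hlen, hval, hmem, hpw⟩ := h
  obtain ⟨hst, hlen2, hind⟩ := popA_spec a i s.2 s.1 (fun m hm => (hmem m).mp hm) hpw hlen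
  refine ⟨hlen2, ?_, ?_, ?_⟩
  · -- the answer array now matches outSpec with lower bound i
    intro j hj
    have : (stepA a s i).1 = (popA a i s.1 s.2).1 := rfl
    rw [this, hind j]
    by_cases hq : j ∈ s.2 ∧ a.getD i 0 < a.getD j 0
    · -- popped now: its previous smaller element is exactly i
      have hcj := (hmem j).mp hq.1
      have hj1 : i + 1 ≤ j := hcj.1
      have hsome : scanL a (a.getD j 0) i j = some i := by
        rw [scanL_eq_some_iff]
        exact ⟨le_rfl, by omega, hq.2, fun l h1 h2 hlt => absurd (hcj.2.2 l (by omega) h2) (by omega)⟩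
      rw [if_pos hq]
      unfold outSpec
      rw [hsome]
    · -- untouched: the lower bound can move from i+1 down to i without change
      rw [if_neg hq, hval j hj]
      by_cases hij : j ≤ i
      · -- unprocessed region: both scans are empty
        have e1 : scanL a (a.getD j 0) (i + 1) j = none :=
          (scanL_eq_none_iff a _ _ j).mpr (fun m h1 h2 => by omega)
        have e2 : scanL a (a.getD j 0) i j = none :=
          (scanL_eq_none_iff a _ _ j).mpr (fun m h1 h2 => by omega)
        unfold outSpec
        rw [e1, e2]
      · by_cases hjst : j ∈ s.2
        · -- still on the stack: a[j] ≤ a[i] and a[j] ≤ a[l] for all i < l < j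
          have hcj := (hmem j).mp hjst
          have hji : ¬ a.getD i 0 < a.getD j 0 := fun hc => hq ⟨hjst, hc⟩
          have e1 : scanL a (a.getD j 0) (i + 1) j = none :=
            (scanL_eq_none_iff a _ _ j).mpr
              (fun m h1 h2 hlt => absurd (hcj.2.2 m h1 h2) (by omega))
          have e2 : scanL a (a.getD j 0) i j = none := by
            rw [scanL_eq_none_iff]
            intro m h1 h2 hlt
            rcases Nat.eq_or_lt_of_le h1 with rfl | h1'
            · omega
            · exact absurd (hcj.2.2 m h1' h2) (by omega)
          unfold outSpec
          rw [e1, e2]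
        · -- popped at an earlier (larger) index: the witness is ≥ i+1 already
          have hwit : ∃ l, i + 1 ≤ l ∧ l < j ∧ a.getD l 0 < a.getD j 0 := by
            by_contra hc
            push_neg at hc
            exact hjst ((hmem j).mpr ⟨by omega, hj, fun l h1 h2 => by
              have := hc l h1 h2; omega⟩)
          obtain ⟨l, hl1, hl2, hl3⟩ := hwit
          cases hsc : scanL a (a.getD j 0) (i + 1) j with
          | none =>
              exact absurd hl3 ((scanL_eq_none_iff a _ _ j).mp hsc l hl1 hl2)
          | some m =>
              obtain ⟨p1, p2, p3, p4⟩ := (scanL_eq_some_iff a _ _ j m).mp hsc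
              have hsc2 : scanL a (a.getD j 0) i j = some m :=
                (scanL_eq_some_iff a _ _ j m).mpr ⟨by omega, p2, p3, p4⟩
              unfold outSpec
              rw [hsc, hsc2]
  · -- stack membership characterisation at bound i
    intro m
    have : (stepA a s i).2 = i :: (popA a i s.1 s.2).2 := rfl
    rw [this, hst, List.mem_cons]
    constructor
    · rintro (rfl | hmf)
      · exact ⟨le_rfl, hi, fun l h1 h2 => by omega⟩
      · obtain ⟨hms, hmle⟩ := List.mem_filter.mp hmf
        have hcm := (hmem m).mp hms
        have hm1 : i + 1 ≤ m := hcm.1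
        refine ⟨by omega, hcm.2.1, ?_⟩
        intro l h1 h2
        rcases Nat.eq_or_lt_of_le h1 with rfl | h1'
        · simpa only [decide_eq_true_eq] using hmle
        · exact hcm.2.2 l h1' h2
    · rintro ⟨h1, h2, h3⟩
      by_cases hmi : m = i
      · exact Or.inl hmi
      · refine Or.inr (List.mem_filter.mpr ⟨(hmem m).mpr ⟨by omega, h2, fun l hl1 hl2 => h3 l (by omega) hl2⟩, ?_⟩)
        have := h3 i le_rfl (by omega)
        simpa only [decide_eq_true_eq] using this
  · -- the stack stays strictly increasing from the top
    have : (stepA a s i).2 = i :: (popA a i s.1 s.2).2 := rfl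
    rw [this, hst]
    refine List.pairwise_cons.mpr ⟨?_, hpw.sublist (List.filter_sublist ..)⟩
    intro m hmf
    have := (hmem m).mp (List.mem_filter.mp hmf).1
    exact this.1

def downA (a : List Int) : List Int × List Nat → Nat → List Int × List Nat
  | s, 0 => s
  | s, i + 1 => downA a (stepA a s i) i

lemma foldl_eq_downA (a : List Int) : ∀ (i : Nat) (s : List Int × List Nat),
    ((List.range i).reverse).foldl (stepA a) s = downA a s i := by
  intro i
  induction i with
  | zero => intro s; simp [downA]
  | succ i ih =>
      intro s
      rw [List.range_succ, List.reverse_append]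
      simp only [List.reverse_singleton, List.singleton_append, List.foldl_cons]
      exact ih (stepA a s i)

lemma downA_inv (a : List Int) : ∀ (i : Nat) (s : List Int × List Nat),
    i ≤ a.length → InvA a i s → InvA a 0 (downA a s i) := by
  intro i
  induction i with
  | zero => intro s _ h; exact h
  | succ i ih =>
      intro s hle h
      exact ih (stepA a s i) (by omega) (stepA_inv a i s (by omega) h)

lemma initA_inv (a : List Int) : InvA a a.length (List.replicate a.length (-1), []) := by
  refine ⟨by simp, ?_, ?_, by simp⟩
  · intro j hj
    have h2 : scanL a (a.getD j 0) a.length j = none :=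
      (scanL_eq_none_iff a _ _ j).mpr (fun m hm1 hm2 => by omega)
    unfold outSpec
    rw [h2]
    simp [List.getD_eq_getElem?_getD, List.getElem?_replicate, hj]
  · intro m
    simp only [List.not_mem_nil, false_iff, charA]
    rintro ⟨h1, h2, _⟩; omega

lemma A_eq_map (a : List Int) :
    First_Smaller_Left a = (List.range a.length).map (fun j => outSpec a 0 j) := by
  have hinv : InvA a 0 (downA a (List.replicate a.length (-1), []) a.length) :=
    downA_inv a a.length _ le_rfl (initA_inv a)
  have hres : First_Smaller_Left a = (downA a (List.replicate a.length (-1), []) a.length).1 := by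
    unfold First_Smaller_Left
    rw [foldl_eq_downA]
  obtain ⟨hlen, hval, -, -⟩ := hinv
  rw [hres]
  apply List.ext_getElem
  · simp [hlen]
  · intro j h1 h2
    have hj : j < a.length := by simpa [hlen] using h1
    have := hval j hj
    rw [List.getD_eq_getElem?_getD, List.getElem?_eq_getElem h1] at this
    simp only [Option.getD_some] at this
    rw [this]
    simp

-- ===== B-side invariant =====

def charB (a : List Int) (k m : Nat) : Prop :=
  m < k ∧ ∀ l, m < l → l < k → a.getD m 0 < a.getD l 0

def InvB (a : List Int) (k : Nat) (s : List Int × List Nat) : Prop :=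
  s.1 = (List.range k).map (fun j => outSpec a 0 j) ∧
  (∀ m, m ∈ s.2 ↔ charB a k m) ∧
  s.2.Pairwise (· > ·)

lemma popB_spec (a : List Int) (k : Nat) :
    ∀ st, (∀ m ∈ st, charB a k m) → st.Pairwise (· > ·) →
      popB a (a.getD k 0) st = st.filter (fun j => decide (a.getD j 0 < a.getD k 0)) := by
  intro st
  induction st with
  | nil => intro _ _; rfl
  | cons j rest ih =>
      intro hmem hpw
      have hcj := hmem j (List.mem_cons_self ..)
      by_cases h : a.getD k 0 ≤ a.getD j 0
      · rw [popB.eq_def]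
        simp only [if_pos h]
        rw [List.filter_cons_of_neg (by simp only [decide_eq_true_eq]; omega)]
        exact ih (fun m hm => hmem m (List.mem_cons_of_mem _ hm)) hpw.of_cons
      · rw [popB.eq_def]
        simp only [if_neg h]
        rw [List.filter_cons_of_pos (by simp only [decide_eq_true_eq]; omega), List.filter_eq_self.mpr]
        intro m hm
        have hcm := hmem m (List.mem_cons_of_mem _ hm)
        have hmj : j > m := (List.pairwise_cons.mp hpw).1 m hm
        have := hcm.2 j hmj hcj.1
        simp only [decide_eq_true_eq]; omega

-- the top of the popped stack is exactly the previous-strictly-smaller index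
lemma head_filter_eq (a : List Int) (k : Nat) (st : List Nat)
    (hmem : ∀ m, m ∈ st ↔ charB a k m) (hpw : st.Pairwise (· > ·)) :
    headIdx (st.filter (fun j => decide (a.getD j 0 < a.getD k 0))) = outSpec a 0 k := by
  have hgr : ∀ m, m < k → a.getD m 0 < a.getD k 0 →
      ∃ m', m' < k ∧ a.getD m' 0 < a.getD k 0 ∧ m' ∈ st ∧
        ∀ l, m' < l → l < k → ¬ a.getD l 0 < a.getD k 0 := by
    intro m hmk hlt
    obtain ⟨m', h1, h2, h3⟩ :=
      greatest_aux (fun m => a.getD m 0 < a.getD k 0) k ⟨m, hmk, hlt⟩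
    refine ⟨m', h1, h2, (hmem m').mpr ⟨h1, fun l hl1 hl2 => ?_⟩, h3⟩
    have := h3 l hl1 hl2
    omega
  cases hf : st.filter (fun j => decide (a.getD j 0 < a.getD k 0)) with
  | nil =>
      have hnone : scanL a (a.getD k 0) 0 k = none := by
        rw [scanL_eq_none_iff]
        intro m _ hmk hlt
        obtain ⟨m', _, hP, hmst, _⟩ := hgr m hmk hlt
        have := List.filter_eq_nil_iff.mp hf m' hmst
        simp only [decide_eq_true_eq] at this; omega
      unfold outSpec
      rw [hnone]
      rfl
  | cons j t =>
      have hj : j ∈ st.filter (fun j => decide (a.getD j 0 < a.getD k 0)) := by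
        rw [hf]; exact List.mem_cons_self ..
      obtain ⟨hjst, hjlt⟩ := List.mem_filter.mp hj
      have hjlt' : a.getD j 0 < a.getD k 0 := by simpa only [decide_eq_true_eq] using hjlt
      have hcj := (hmem j).mp hjst
      have hsome : scanL a (a.getD k 0) 0 k = some j := by
        rw [scanL_eq_some_iff]
        refine ⟨Nat.zero_le j, hcj.1, hjlt', ?_⟩
        intro l hl1 hl2 hlt
        obtain ⟨m', hm'k, hP, hm'st, hmax⟩ := hgr l hl2 hlt
        have hlm' : l ≤ m' := by
          by_contra hc
          exact (hmax l (by omega) hl2) hlt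
        have hm'f : m' ∈ st.filter (fun j => decide (a.getD j 0 < a.getD k 0)) :=
          List.mem_filter.mpr ⟨hm'st, by simpa only [decide_eq_true_eq] using hP⟩
        rw [hf] at hm'f
        have hpwf : (j :: t).Pairwise (fun x y : Nat => x > y) := by
          rw [← hf]
          exact hpw.sublist (List.filter_sublist ..)
        rcases List.mem_cons.mp hm'f with rfl | hm't
        · omega
        · have := (List.pairwise_cons.mp hpwf).1 m' hm't
          omega
      unfold outSpec
      rw [hsome]
      rfl

lemma stepB_inv (a : List Int) (k : Nat) (s : List Int × List Nat)
    (h : InvB a k s) : InvB a (k + 1) (stepB a s k) := by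
  obtain ⟨hres, hmem, hpw⟩ := h
  have hpop := popB_spec a k s.2 (fun m hm => (hmem m).mp hm) hpw
  refine ⟨?_, ?_, ?_⟩
  · have : (stepB a s k).1 = s.1 ++ [headIdx (popB a (a.getD k 0) s.2)] := rfl
    rw [this, List.range_succ, List.map_append, hres, hpop,
      head_filter_eq a k s.2 hmem hpw]
    rfl
  · intro m
    have : (stepB a s k).2 = k :: popB a (a.getD k 0) s.2 := rfl
    rw [this, hpop, List.mem_cons]
    constructor
    · rintro (rfl | hmf)
      · exact ⟨by omega, fun l h1 h2 => by omega⟩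
      · obtain ⟨hms, hmlt⟩ := List.mem_filter.mp hmf
        have hcm := (hmem m).mp hms
        have hm1 : m < k := hcm.1
        refine ⟨by omega, ?_⟩
        intro l h1 h2
        rcases Nat.lt_succ_iff_lt_or_eq.mp h2 with h2' | rfl
        · exact hcm.2 l h1 h2'
        · simpa only [decide_eq_true_eq] using hmlt
    · rintro ⟨h1, h2⟩
      by_cases hmk : m = k
      · exact Or.inl hmk
      · refine Or.inr (List.mem_filter.mpr
          ⟨(hmem m).mpr ⟨by omega, fun l hl1 hl2 => h2 l hl1 (by omega)⟩, ?_⟩)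
        have := h2 k (by omega) (by omega)
        simpa only [decide_eq_true_eq] using this
  · have : (stepB a s k).2 = k :: popB a (a.getD k 0) s.2 := rfl
    rw [this, hpop]
    refine List.pairwise_cons.mpr ⟨?_, hpw.sublist (List.filter_sublist ..)⟩
    intro m hmf
    have := (hmem m).mp (List.mem_filter.mp hmf).1
    exact this.1

lemma B_eq_map (a : List Int) :
    First_Smaller_Left_alt a = (List.range a.length).map (fun j => outSpec a 0 j) := by
  have h : ∀ k, InvB a k ((List.range k).foldl (stepB a) ([], [])) := by
    intro k
    induction k with
    | zero => exact ⟨by simp, by simp [charB], by simp⟩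
    | succ k ih =>
        rw [List.range_succ, List.foldl_append, List.foldl_cons, List.foldl_nil]
        exact stepB_inv a k _ ih
  exact (h a.length).1

-- ===== VERDICT (by name: the statement is the Claim_ definition above) =====
theorem First_Smaller_Left_spec : Claim_equal_First_Smaller_Left := by
  intro a _
  unfold Spec_First_Smaller_Left
  rw [A_eq_map, B_eq_map]
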